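-- pv_equiv track=rewrite | github.com/coding-test-dgu/codingTest | LeeJH/1주차/0411_LEE_Programmers[Level 2]타겟넘버.py | solution
-- ===== SOURCE A (Python) =====
-- from collections import deque
--
-- def solution(numbers, target):
--     answer = 0
--     queue = deque()
--     queue.append((0, 0)) #(total, idx)
--
--     while queue:
--         total, idx = queue.popleft()
--         # idx가 numbers의 길이와 동일? => 모든 숫자를 다 사용한 것.
--         if idx == len(numbers):
--             # 그때, 합한 total이 target과 같다면, answer(+1)
--             if total == target:
--                 answer += 1
--         # 해당 idx의 number를 더하거나 뺀값을, total에 넣고 큐에 append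
--         else:
--             queue.append((total + numbers[idx], idx + 1))
--             queue.append((total - numbers[idx], idx + 1))
--
--     return answer
-- ===== SOURCE B (Python) =====
-- def solution(numbers, target):
--     counts = {0: 1}
--     for x in numbers:
--         nxt = {}
--         for s, c in counts.items():
--             nxt[s + x] = nxt.get(s + x, 0) + c
--             nxt[s - x] = nxt.get(s - x, 0) + c
--         counts = nxt
--     return counts.get(target, 0)
-- ===== Notes on version B (the rewrite author's own statement) =====
-- stated objective: faster
-- what changed: Replaces the BFS over all 2^n sign-choice states with a dynamic programme: a dict mapping each reachable partial sum to the number of ways to reach it, updated once per number.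
import Mathlib
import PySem

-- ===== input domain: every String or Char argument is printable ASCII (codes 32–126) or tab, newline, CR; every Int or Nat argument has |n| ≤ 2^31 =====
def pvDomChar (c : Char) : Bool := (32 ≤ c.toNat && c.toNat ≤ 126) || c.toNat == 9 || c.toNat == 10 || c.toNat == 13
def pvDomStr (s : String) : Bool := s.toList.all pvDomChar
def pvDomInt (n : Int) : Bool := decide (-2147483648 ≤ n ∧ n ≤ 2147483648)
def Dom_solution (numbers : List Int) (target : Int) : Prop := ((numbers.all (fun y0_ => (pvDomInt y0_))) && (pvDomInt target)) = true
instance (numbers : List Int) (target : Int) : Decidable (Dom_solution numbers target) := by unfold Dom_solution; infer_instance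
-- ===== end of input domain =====

-- B replaces A's BFS over all 2^n sign-choice states with a dict-based dynamic
-- programme (partial sum ↦ count), one pass per number: an asymptotically faster algorithm.


-- ===== PORT A =====
-- the while-loop over the deque of (total, idx) states; popleft = head, append = ++ [·].
-- The `none` branch totalises the out-of-range index numbers[idx] (Python's IndexError);
-- it is unreachable from solution's initial queue [(0, 0)].
def solutionLoop (numbers : List Int) (target : Int) (answer : Int) :
    List (Int × Nat) → Int
  | [] => answer
  | (total, idx) :: rest =>
    if idx = numbers.length then
      solutionLoop numbers target (if total = target then answer + 1 else answer) rest
    else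
      match _h : numbers[idx]? with
      | none => answer
      | some x =>
        solutionLoop numbers target answer
          (rest ++ [(total + x, idx + 1), (total - x, idx + 1)])
termination_by q => (q.map (fun p => 3 ^ (numbers.length - p.2))).sum
decreasing_by
  · have h3 : 0 < 3 ^ (numbers.length - idx) := pow_pos (by norm_num) _
    simp only [List.map_cons, List.sum_cons]
    omega
  · have hidx : idx < numbers.length := (List.getElem?_eq_some_iff.mp _h).1
    have hk : numbers.length - idx = (numbers.length - (idx + 1)) + 1 := by omega
    have h3 : 0 < 3 ^ (numbers.length - (idx + 1)) := pow_pos (by norm_num) _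
    simp only [List.map_cons, List.sum_cons, List.map_append, List.sum_append,
      List.map_nil, List.sum_nil, hk, pow_succ]
    omega

def solution (numbers : List Int) (target : Int) : Int :=
  solutionLoop numbers target 0 [(0, 0)]

-- ===== PORT B =====
-- one DP step: for s, c in counts.items(): nxt[s+x] += c; nxt[s-x] += c   (dict starts empty)
def bStep (x : Int) (counts : PySem.Dict Int Int) : PySem.Dict Int Int :=
  counts.items.foldl
    (fun nxt p => (nxt.modify (p.1 + x) 0 (· + p.2)).modify (p.1 - x) 0 (· + p.2))
    PySem.Dict.empty

def solution_alt (numbers : List Int) (target : Int) : Int :=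
  (numbers.foldl (fun counts x => bStep x counts)
      ((PySem.Dict.empty : PySem.Dict Int Int).insert 0 1)).getD target 0

-- ===== PRECONDITION & SPEC =====
def Spec_solution (numbers : List Int) (target : Int) (out : Int) : Prop := out = solution_alt numbers target
instance (numbers : List Int) (target : Int) (out : Int) : Decidable (Spec_solution numbers target out) := by unfold Spec_solution; infer_instance

-- ===== CLAIM (what is proved, stated in full; the proofs are below) =====
def Claim_equal_solution : Prop := ∀ (numbers : List Int) (target : Int), Dom_solution numbers target → Spec_solution numbers target (solution numbers target)

-- ===== LEMMAS AND PROOFS =====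

-- the common mathematical yardstick: countG xs g t = Σ over sign assignments ε of xs
-- of g (t - Σ εᵢ xᵢ); with g = (if · = 0 then 1 else 0) it counts assignments hitting t.
def countG : List Int → (Int → Int) → Int → Int
  | [], g, t => g t
  | x :: xs, g, t => countG xs g (t - x) + countG xs g (t + x)

theorem countG_shift (xs : List Int) (g : Int → Int) (x t : Int) :
    countG xs (fun u => g (u - x) + g (u + x)) t = countG xs g (t - x) + countG xs g (t + x) := by
  induction xs generalizing t with
  | nil => rfl
  | cons y ys ih =>
    simp only [countG, ih]
    have e1 : t - y - x = t - x - y := by ring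
    have e2 : t - y + x = t + x - y := by ring
    have e3 : t + y - x = t - x + y := by ring
    have e4 : t + y + x = t + x + y := by ring
    rw [e1, e2, e3, e4]; ring

theorem countG_congr (xs : List Int) (g g' : Int → Int) (h : ∀ u, g u = g' u) (t : Int) :
    countG xs g t = countG xs g' t := by
  induction xs generalizing t with
  | nil => exact h t
  | cons y ys ih => simp only [countG, ih]

-- sum of a key-matching selection over a Nodup list
theorem sum_if_mem (l : List Int) (g : Int → Int) (k : Int) (h : l.Nodup) :
    (l.map (fun j => if j = k then g j else 0)).sum = if k ∈ l then g k else 0 := by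
  induction l with
  | nil => simp
  | cons j l ih =>
    rcases List.nodup_cons.mp h with ⟨hj, hl⟩
    simp only [List.map_cons, List.sum_cons, ih hl, List.mem_cons]
    by_cases hjk : j = k
    · subst hjk
      simp [hj]
    · simp [hjk, Ne.symm hjk]

theorem sum_if_items (d : PySem.Dict Int Int) (hnd : d.keys.Nodup) (k : Int) :
    (d.items.map (fun p => if p.1 = k then p.2 else 0)).sum = d.getD k 0 := by
  rw [PySem.Dict.items_eq_map_keys d hnd 0, List.map_map]
  have : ((fun p : Int × Int => if p.1 = k then p.2 else 0) ∘ fun j => (j, d.getD j 0))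
      = fun j => if j = k then d.getD j 0 else 0 := by
    funext j; rfl
  rw [this, sum_if_mem d.keys _ k hnd]
  by_cases hk : k ∈ d.keys
  · simp [hk]
  · have hc : d.contains k = false := by
      by_contra hcc
      exact hk ((PySem.Dict.contains_iff_mem_keys d k).mp (by simpa using hcc))
    simp [hk, PySem.Dict.getD_of_not_contains d 0 hc]

theorem nodup_keys_modify (d : PySem.Dict Int Int) (k d0 : Int) (f : Int → Int)
    (h : d.keys.Nodup) : (d.modify k d0 f).keys.Nodup := by
  rw [PySem.Dict.keys_modify]
  by_cases hc : d.contains k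
  · rw [PySem.Dict.keys_insert_of_contains d _ hc]
    exact h
  · rw [PySem.Dict.keys_insert_of_not_contains d _ (by simpa using hc)]
    refine List.nodup_append.mpr ⟨h, List.nodup_singleton _, ?_⟩
    intro a ha b hb heq
    subst heq
    rw [List.mem_singleton] at hb
    subst hb
    exact hc ((PySem.Dict.contains_iff_mem_keys _ _).mpr ha)

theorem nodup_keys_foldl_modify2 (x : Int) (L : List (Int × Int)) (n0 : PySem.Dict Int Int)
    (h : n0.keys.Nodup) :
    ((L.foldl (fun nxt p => (nxt.modify (p.1 + x) 0 (· + p.2)).modify (p.1 - x) 0 (· + p.2)) n0)).keys.Nodup := by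
  induction L generalizing n0 with
  | nil => exact h
  | cons p L ih =>
    exact ih _ (nodup_keys_modify _ _ _ _ (nodup_keys_modify _ _ _ _ h))

theorem foldl_modify2_getD (x t : Int) (L : List (Int × Int)) (n0 : PySem.Dict Int Int) :
    (L.foldl (fun nxt p => (nxt.modify (p.1 + x) 0 (· + p.2)).modify (p.1 - x) 0 (· + p.2)) n0).getD t 0
      = n0.getD t 0
        + ((L.map (fun p => if p.1 = t - x then p.2 else 0)).sum
           + (L.map (fun p => if p.1 = t + x then p.2 else 0)).sum) := by
  induction L generalizing n0 with
  | nil => simp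
  | cons p L ih =>
    simp only [List.foldl_cons, List.map_cons, List.sum_cons, ih]
    have hstep :
        (((n0.modify (p.1 + x) 0 (· + p.2)).modify (p.1 - x) 0 (· + p.2))).getD t 0
          = n0.getD t 0 + ((if p.1 = t - x then p.2 else 0) + (if p.1 = t + x then p.2 else 0)) := by
      simp only [PySem.Dict.getD_modify]
      split_ifs <;> subst_vars <;>
        first
          | omega
          | (have hx0 : x = 0 := by omega
             subst hx0
             simp only [add_zero, sub_zero] at *
             omega)
    rw [hstep]; ring

theorem bStep_getD (x : Int) (d : PySem.Dict Int Int) (hnd : d.keys.Nodup) (t : Int) :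
    (bStep x d).getD t 0 = d.getD (t - x) 0 + d.getD (t + x) 0 := by
  unfold bStep
  rw [foldl_modify2_getD, sum_if_items d hnd, sum_if_items d hnd]
  simp [PySem.Dict.getD_empty]

theorem bStep_nodup (x : Int) (d : PySem.Dict Int Int) : (bStep x d).keys.Nodup := by
  unfold bStep
  exact nodup_keys_foldl_modify2 x d.items PySem.Dict.empty (by simp [PySem.Dict.keys_empty])

-- B's foldl computes countG of the lookup function of the starting dict
theorem b_foldl_getD (xs : List Int) (d : PySem.Dict Int Int) (hnd : d.keys.Nodup) (t : Int) :
    (xs.foldl (fun counts x => bStep x counts) d).getD t 0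
      = countG xs (fun u => d.getD u 0) t := by
  induction xs generalizing d t with
  | nil => rfl
  | cons x xs ih =>
    simp only [List.foldl_cons, countG]
    rw [ih (bStep x d) (bStep_nodup x d) t]
    rw [countG_congr xs _ (fun u => d.getD (u - x) 0 + d.getD (u + x) 0)
      (fun u => bStep_getD x d hnd u)]
    exact countG_shift xs (fun u => PySem.Dict.getD d u 0) x t

-- the indicator base function
def gZero : Int → Int := fun u => if u = 0 then 1 else 0

-- A's BFS loop invariant: the loop returns answer plus, for each queued state
-- (total, idx), the number of sign assignments of the remaining suffix hitting target.
theorem solutionLoop_eq (numbers : List Int) (target : Int) (answer : Int)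
    (queue : List (Int × Nat)) (hq : ∀ p ∈ queue, p.2 ≤ numbers.length) :
    solutionLoop numbers target answer queue
      = answer + (queue.map (fun p => countG (numbers.drop p.2) gZero (target - p.1))).sum := by
  induction answer, queue using solutionLoop.induct numbers target with
  | case1 answer => simp [solutionLoop]
  | case2 answer total rest ih =>
    have hrest : ∀ p ∈ rest, p.2 ≤ numbers.length := fun p hp => hq p (List.mem_cons_of_mem _ hp)
    have H := ih hrest
    rw [solutionLoop, if_pos rfl]
    by_cases ht : total = target
    · rw [if_pos ht]
      rw [dif_pos ht] at H
      rw [H]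
      simp only [List.map_cons, List.sum_cons, List.drop_length, countG, gZero]
      split_ifs <;> omega
    · rw [if_neg ht]
      rw [dif_neg ht] at H
      rw [H]
      simp only [List.map_cons, List.sum_cons, List.drop_length, countG, gZero]
      split_ifs <;> omega
  | case3 answer total idx rest hidx hnone =>
    exfalso
    have : idx ≤ numbers.length := hq (total, idx) List.mem_cons_self
    have hlt : idx < numbers.length := by omega
    rw [List.getElem?_eq_getElem hlt] at hnone
    simp at hnone
  | case4 answer total idx rest hidx x hsome ih =>
    have hlt : idx < numbers.length := (List.getElem?_eq_some_iff.mp hsome).1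
    have hx : numbers[idx] = x := by
      have := (List.getElem?_eq_some_iff.mp hsome).2
      simpa using this
    have hnew : ∀ p ∈ rest ++ [(total + x, idx + 1), (total - x, idx + 1)],
        p.2 ≤ numbers.length := by
      intro p hp
      simp only [List.mem_append, List.mem_cons, List.not_mem_nil, or_false] at hp
      rcases hp with h | h | h
      · exact hq p (List.mem_cons_of_mem _ h)
      · subst h; exact hlt
      · subst h; exact hlt
    rw [solutionLoop, if_neg hidx]
    split
    next heq => rw [heq] at hsome; cases hsome
    next y heq =>
      rw [heq] at hsome
      injection hsome with hxy
      subst hxy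
      rw [ih hnew]
      simp only [List.map_append, List.sum_append, List.map_cons, List.sum_cons,
        List.map_nil, List.sum_nil]
      have hdrop : numbers.drop idx = numbers[idx] :: numbers.drop (idx + 1) :=
        List.drop_eq_getElem_cons hlt
      rw [hdrop, hx]
      simp only [countG]
      have e1 : target - total - y = target - (total + y) := by ring
      have e2 : target - total + y = target - (total - y) := by ring
      rw [e1, e2]; ring

theorem solution_eq_countG (numbers : List Int) (target : Int) :
    solution numbers target = countG numbers gZero target := by
  unfold solution
  rw [solutionLoop_eq numbers target 0 [(0, 0)] (by simp)]
  simp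

theorem solution_alt_eq_countG (numbers : List Int) (target : Int) :
    solution_alt numbers target = countG numbers gZero target := by
  unfold solution_alt
  rw [b_foldl_getD numbers _ (PySem.Dict.nodup_keys_insert _ _ _ PySem.Dict.nodup_keys_empty) target]
  apply countG_congr
  intro u
  rw [PySem.Dict.getD_insert]
  simp [gZero, PySem.Dict.getD_empty]

-- ===== VERDICT (by name: the statement is the Claim_ definition above) =====
theorem solution_spec : Claim_equal_solution := by
  intro numbers target _
  unfold Spec_solution
  rw [solution_eq_countG, solution_alt_eq_countG]
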